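-- pv_equiv track=rewrite | github.com/FacuGarces/IP-Ex-Algo1- | Python/Parcial_B.py | ordenarporvip
-- ===== SOURCE A (Python) =====
-- def ordenarporvip(lista: list[str,str]) -> list:
--     listavip: list = []
--     listanovip: list = []
--     for dupla in lista:
--         if dupla[1] == "vip":
--             listavip.append(dupla[0])
--         elif dupla[1] == "comun":
--             listanovip.append(dupla[0])
--     return listavip + listanovip
-- ===== SOURCE B (Python) =====
-- def ordenarporvip(lista: list[str, str]) -> list:
--     return [n for n, t in lista if t == "vip"] + [n for n, t in lista if t == "comun"]
-- ===== Notes on version B (the rewrite author's own statement) =====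
-- stated objective: simpler
-- what changed: Replaces the single accumulating loop maintaining two lists with two independent filtered comprehensions over the input, concatenated.
import Mathlib
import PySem

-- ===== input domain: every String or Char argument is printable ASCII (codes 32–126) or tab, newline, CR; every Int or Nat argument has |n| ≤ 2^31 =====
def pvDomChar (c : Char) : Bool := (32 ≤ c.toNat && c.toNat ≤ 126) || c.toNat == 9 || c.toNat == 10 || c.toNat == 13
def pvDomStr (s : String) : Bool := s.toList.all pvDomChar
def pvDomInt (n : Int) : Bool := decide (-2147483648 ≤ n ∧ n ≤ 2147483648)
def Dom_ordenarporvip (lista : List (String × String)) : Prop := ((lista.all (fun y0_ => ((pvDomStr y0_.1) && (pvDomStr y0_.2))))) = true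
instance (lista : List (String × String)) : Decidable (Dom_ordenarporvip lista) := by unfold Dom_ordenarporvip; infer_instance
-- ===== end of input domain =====

-- B replaces the single loop that accumulates two lists with two filtered passes; objective: simpler.

-- ===== PORT A =====
-- one pass, threading the pair of accumulators (listavip, listanovip)
def ordenarporvip (lista : List (String × String)) : List String :=
  let acc := lista.foldl (fun (st : List String × List String) dupla =>
    if dupla.2 = "vip" then (st.1 ++ [dupla.1], st.2)
    else if dupla.2 = "comun" then (st.1, st.2 ++ [dupla.1])
    else st) ([], [])
  acc.1 ++ acc.2

-- ===== PORT B =====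
def ordenarporvip_alt (lista : List (String × String)) : List String :=
  (lista.filter (fun d => d.2 = "vip")).map (fun d => d.1)
  ++ (lista.filter (fun d => d.2 = "comun")).map (fun d => d.1)

-- ===== PRECONDITION & SPEC =====
def Spec_ordenarporvip (lista : List (String × String)) (out : List String) : Prop := out = ordenarporvip_alt lista
instance (lista : List (String × String)) (out : List String) : Decidable (Spec_ordenarporvip lista out) := by unfold Spec_ordenarporvip; infer_instance

-- ===== CLAIM (what is proved, stated in full; the proofs are below) =====
def Claim_equal_ordenarporvip : Prop := ∀ (lista : List (String × String)), Dom_ordenarporvip lista → Spec_ordenarporvip lista (ordenarporvip lista)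

-- ===== LEMMAS AND PROOFS =====

-- loop invariant: the fold's state is the two filtered-and-mapped prefixes, carried from any start state
theorem ordenarporvip_fold_inv (lista : List (String × String)) (v c : List String) :
    lista.foldl (fun (st : List String × List String) dupla =>
      if dupla.2 = "vip" then (st.1 ++ [dupla.1], st.2)
      else if dupla.2 = "comun" then (st.1, st.2 ++ [dupla.1])
      else st) (v, c)
    = (v ++ (lista.filter (fun d => d.2 = "vip")).map (fun d => d.1),
       c ++ (lista.filter (fun d => d.2 = "comun")).map (fun d => d.1)) := by
  induction lista generalizing v c with
  | nil => simp
  | cons hd tl ih =>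
    by_cases h1 : hd.2 = "vip"
    · simp [List.foldl, h1, ih]
    · by_cases h2 : hd.2 = "comun"
      · simp [List.foldl, h1, h2, ih]
      · simp [List.foldl, h1, h2, ih]

-- ===== VERDICT (by name: the statement is the Claim_ definition above) =====
theorem ordenarporvip_spec : Claim_equal_ordenarporvip := by
  intro lista _
  unfold Spec_ordenarporvip ordenarporvip ordenarporvip_alt
  simp [ordenarporvip_fold_inv]
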